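-- pv_equiv track=rewrite | github.com/yichen057/Leetcode-Notes | string/541.reverse-string-ii.py | replace_number
-- ===== SOURCE A (Python) =====
-- def replace_number(s: str) -> str:
--     """
--     题目：将字符串 s 中的每个数字字符替换为 "number"
--     核心思路：先扩容，然后从后向前填充，避免频繁移动元素。
--     """
--     # --- 第一步：统计有多少个数字 ---
--     digit_count=0
--     for char in s:
--         if char.isdigit():
--             digit_count += 1
--
--     # --- 第二步：计算扩容后的新长度 ---
--     # 原字符串长度
--     old_length = len(s)
--     # 新长度 = 原长度 + (数字个数 * 5)
--     # 为什么乘5？因为 "number" 是6个字符，原数字占1个，替换后相当于多占了5个坑位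
--     new_length = old_length + (digit_count * 5)
--
--     # --- 第三步：创建新列表（预先占位） ---
--     # Python字符串不可变，所以我们需要一个列表来模拟字符数组
--     # 创建一个长度为 new_length 的列表，里面全填上空字符
--     res = [''] * new_length
--
--     # --- 第四步：定义双指针（核心！） ---
--     # old_ptr 指向原字符串的最后一个字符
--     old_ptr = old_length - 1
--     # new_ptr 指向新列表的最后一个空位
--     new_ptr = new_length - 1
--
--     # --- 第五步：从后向前遍历 ---
--     # 如果从前向后填充，每次遇到一个数字插入 "number"，后面的所有字符都要向后移动，时间复杂度会变成 O(n^2)。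
--     # 从后向前填充的好处是：直接把字符放到最终位置，每个字符只处理一次，时间复杂度是 O(n)。
--     while old_ptr >= 0:
--         current_char = s[old_ptr]
--
--         # --- 情况A：如果是数字，填入 "number" ---
--         if current_char.isdigit():
--             # 我们需要填入 'n', 'u', 'm', 'b', 'e', 'r' 这6个字符
--             # 因为是从后往前填，用切片操作
--             # 例如：new_ptr=10 时，填入下标 5-10 的位置
--             start_pos = new_ptr - 5
--             end_pos = new_ptr + 1
--             res[start_pos:end_pos] = "number"
--             new_ptr -= 6
--
--         # --- 情况B：如果是字母，直接复制过来 ---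
--         else:
--             res[new_ptr] = current_char
--             new_ptr -= 1
--
--         # 无论填什么，旧指针都要向前走 1 格
--         old_ptr -= 1
--
--     # --- 第六步：将列表转回字符串并返回 ---
--     return "".join(res)
-- ===== SOURCE B (Python) =====
-- def replace_number(s: str) -> str:
--     # One forward pass: emit "number" for each digit, the char itself otherwise.
--     return "".join("number" if c.isdigit() else c for c in s)
-- ===== Notes on version B (the rewrite author's own statement) =====
-- stated objective: simpler
-- what changed: Replaced A's digit-count pass plus preallocated list with backward two-pointer slice filling by a single forward generator joined once.
import Mathlib
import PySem

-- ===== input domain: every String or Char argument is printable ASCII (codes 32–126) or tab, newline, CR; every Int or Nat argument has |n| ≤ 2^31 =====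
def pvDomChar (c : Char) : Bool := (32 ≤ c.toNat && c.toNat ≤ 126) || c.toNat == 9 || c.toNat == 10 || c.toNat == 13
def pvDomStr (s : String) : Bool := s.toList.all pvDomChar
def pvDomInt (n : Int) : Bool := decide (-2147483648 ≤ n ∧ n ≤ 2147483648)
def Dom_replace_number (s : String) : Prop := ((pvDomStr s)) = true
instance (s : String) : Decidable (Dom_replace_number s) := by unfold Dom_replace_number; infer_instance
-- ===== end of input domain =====

-- B replaces A's digit-count pass + preallocated list + backward two-pointer fill by one forward pass joined once (simpler).

-- ===== PORT A =====
-- A's while loop: old_ptr walks the original string backwards, new_ptr the preallocated res backwards.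
-- res[start_pos:end_pos] = "number" (an equal-length, in-range slice assignment) is ported as
-- take ++ six 1-char strings ++ drop, and res[new_ptr] = current_char as List.set — both exact for the
-- in-range indices this loop produces; s[old_ptr] via pyGet? (always some while old_ptr ≥ 0 here).
def rnLoop (s : List Char) (res : List String) (old_ptr new_ptr : Int) : List String :=
  if h : old_ptr ≥ 0 then
    let current_char := (PySem.List.pyGet? s old_ptr).getD ' '
    if PySem.Chars.isdigit current_char then
      let start_pos := new_ptr - 5
      let res' := res.take start_pos.toNat ++ ("number".toList.map (fun c => String.ofList [c])) ++ res.drop (start_pos.toNat + 6)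
      rnLoop s res' (old_ptr - 1) (new_ptr - 6)
    else
      let res' := res.set new_ptr.toNat (String.ofList [current_char])
      rnLoop s res' (old_ptr - 1) (new_ptr - 1)
  else res
termination_by (old_ptr + 1).toNat
decreasing_by all_goals omega

def replace_number (s : String) : String :=
  let cs := s.toList
  let digit_count : Int := cs.foldl (fun n c => if PySem.Chars.isdigit c then n + 1 else n) 0
  let old_length : Int := cs.length
  let new_length : Int := old_length + digit_count * 5
  let res : List String := List.replicate new_length.toNat ""
  PySem.Str.join "" (rnLoop cs res (old_length - 1) (new_length - 1))

-- ===== PORT B =====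
def replace_number_alt (s : String) : String :=
  PySem.Str.join "" (s.toList.map (fun c => if PySem.Chars.isdigit c then "number" else String.ofList [c]))

-- ===== PRECONDITION & SPEC =====
def Spec_replace_number (s : String) (out : String) : Prop := out = replace_number_alt s
instance (s : String) (out : String) : Decidable (Spec_replace_number s out) := by unfold Spec_replace_number; infer_instance

-- ===== CLAIM (what is proved, stated in full; the proofs are below) =====
def Claim_equal_replace_number : Prop := ∀ (s : String), Dom_replace_number s → Spec_replace_number s (replace_number s)

-- ===== LEMMAS AND PROOFS =====

-- the fully-filled contents of A's res list
def rnExpand (cs : List Char) : List String :=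
  cs.flatMap (fun c => if PySem.Chars.isdigit c then ("number".toList.map (fun d => String.ofList [d])) else [String.ofList [c]])

theorem rnExpand_append (l : List Char) (c : Char) :
    rnExpand (l ++ [c]) = rnExpand l ++ (if PySem.Chars.isdigit c then ("number".toList.map (fun d => String.ofList [d])) else [String.ofList [c]]) := by
  simp [rnExpand]

-- loop invariant: with the suffix cs.drop k already filled in at the back of res, running the loop
-- from old_ptr = k-1 and new_ptr = |rnExpand (cs.take k)| - 1 completes the fill.
theorem rnLoop_invariant (cs : List Char) :
    ∀ k : Nat, k ≤ cs.length →
      rnLoop cs (List.replicate (rnExpand (cs.take k)).length "" ++ rnExpand (cs.drop k))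
        ((k : Int) - 1) ((rnExpand (cs.take k)).length - 1) = rnExpand cs := by
  intro k
  induction k with
  | zero =>
    intro _
    rw [rnLoop]
    simp [rnExpand]
  | succ k ih =>
    intro hk
    have hklt : k < cs.length := by omega
    have harg : ((k + 1 : Nat) : Int) - 1 = ((k : Nat) : Int) := by push_cast; ring
    have hget : (PySem.List.pyGet? cs ((k : Nat) : Int)).getD ' ' = cs[k] := by
      simp [PySem.List.pyGet?, PySem.List.pyIdx?, hklt]
    have htake : cs.take (k + 1) = cs.take k ++ [cs[k]] := by
      rw [List.take_succ]; simp [List.getElem?_eq_getElem hklt]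
    have hdrop : cs.drop k = cs[k] :: cs.drop (k + 1) := List.drop_eq_getElem_cons hklt
    rw [rnLoop, dif_pos (by omega : ((k + 1 : Nat) : Int) - 1 ≥ 0)]
    rw [harg, hget]
    set w0 := (rnExpand (cs.take k)).length with hw0
    by_cases hd : PySem.Chars.isdigit cs[k] = true
    · have hw : (rnExpand (cs.take (k+1))).length = w0 + 6 := by
        rw [htake, rnExpand_append, if_pos hd]; simp; exact hw0.symm
      rw [if_pos hd, hw]
      have h1 : ((w0 + 6 : Nat) : Int) - 1 - 5 = (w0 : Int) := by push_cast; ring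
      simp only [h1, Int.toNat_natCast]
      have htk : (List.replicate (w0+6) "" ++ rnExpand (cs.drop (k+1))).take w0 = List.replicate w0 "" := by
        rw [List.take_append_of_le_length (by simp)]
        simp [List.take_replicate]
      have hdr : (List.replicate (w0+6) "" ++ rnExpand (cs.drop (k+1))).drop (w0 + 6) = rnExpand (cs.drop (k+1)) := by
        simpa using List.drop_left (l₁ := List.replicate (w0+6) ("":String)) (l₂ := rnExpand (cs.drop (k+1)))
      simp only [htk, hdr]
      have hmid : List.replicate w0 "" ++ ("number".toList.map (fun c => String.ofList [c])) ++ rnExpand (cs.drop (k+1))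
          = List.replicate w0 "" ++ rnExpand (cs.drop k) := by
        rw [hdrop]; simp only [rnExpand, List.flatMap_cons, if_pos hd, List.append_assoc]
      simp only [List.append_assoc, show (List.replicate w0 ("":String) ++ (("number".toList.map (fun c => String.ofList [c])) ++ rnExpand (cs.drop (k+1)))) = List.replicate w0 "" ++ rnExpand (cs.drop k) from by rw [← List.append_assoc]; exact hmid]
      have h2 : ((w0 + 6 : Nat) : Int) - 1 - 6 = (w0 : Int) - 1 := by push_cast; ring
      simp only [h2]
      exact ih (by omega)
    · have hdf : PySem.Chars.isdigit cs[k] = false := by simpa using hd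
      have hw : (rnExpand (cs.take (k+1))).length = w0 + 1 := by
        rw [htake, rnExpand_append, if_neg (by simp [hdf])]; simp; exact hw0.symm
      rw [if_neg (by simp [hdf]), hw]
      have h1 : (((w0 + 1 : Nat) : Int) - 1).toNat = w0 := by omega
      simp only [h1]
      have hset : (List.replicate (w0+1) "" ++ rnExpand (cs.drop (k+1))).set w0 (String.ofList [cs[k]])
          = List.replicate w0 "" ++ rnExpand (cs.drop k) := by
        rw [hdrop]
        rw [List.set_append]
        rw [if_pos (by simp)]
        rw [List.replicate_succ' (n := w0)]
        rw [List.set_append]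
        rw [if_neg (by simp)]
        simp only [rnExpand, List.flatMap_cons, hdf, Bool.false_eq_true, if_false, List.length_replicate,
          Nat.sub_self, List.set_cons_zero, List.append_assoc, List.singleton_append]
      simp only [hset]
      have h2 : ((w0 + 1 : Nat) : Int) - 1 - 1 = (w0 : Int) - 1 := by push_cast; ring
      simp only [h2]
      exact ih (by omega)

theorem rnFold_count (cs : List Char) (init : Int) :
    cs.foldl (fun n c => if PySem.Chars.isdigit c then n + 1 else n) init
      = init + (cs.countP (fun c => PySem.Chars.isdigit c) : Nat) := by
  induction cs generalizing init with
  | nil => simp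
  | cons c cs ih => by_cases h : PySem.Chars.isdigit c <;> simp [h, ih] <;> ring

theorem rnExpand_length (cs : List Char) :
    (rnExpand cs).length = cs.length + 5 * cs.countP (fun c => PySem.Chars.isdigit c) := by
  induction cs with
  | nil => simp [rnExpand]
  | cons c cs ih => by_cases h : PySem.Chars.isdigit c <;> simp [rnExpand, h] at * <;> omega

theorem join_nil_flatten (l : List (List Char)) :
    PySem.Chars.join [] l = l.flatten := by
  simp only [PySem.Chars.join]
  induction l with
  | nil => rfl
  | cons a l ih => cases l <;> simp_all [List.intercalate, List.intersperse]

theorem rnExpand_join (cs : List Char) :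
    ((rnExpand cs).map String.toList).flatten
      = ((cs.map (fun c => if PySem.Chars.isdigit c then "number" else String.ofList [c])).map String.toList).flatten := by
  induction cs with
  | nil => simp [rnExpand]
  | cons c cs ih =>
    by_cases h : PySem.Chars.isdigit c = true <;> simp [rnExpand, h] at * <;> simp [ih]

theorem join_toList (parts : List String) :
    (PySem.Str.join "" parts).toList = PySem.Chars.join [] (parts.map String.toList) := by
  simp [PySem.Str.join]

-- ===== VERDICT (by name: the statement is the Claim_ definition above) =====
theorem replace_number_spec : Claim_equal_replace_number := by
  intro s _
  unfold Spec_replace_number replace_number replace_number_alt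
  set cs := s.toList with hcs
  have hfold : cs.foldl (fun n c => if PySem.Chars.isdigit c then n + 1 else n) (0:Int)
      = (cs.countP (fun c => PySem.Chars.isdigit c) : Nat) := by
    simpa using rnFold_count cs 0
  have hlen : ((cs.length : Int) + (cs.countP (fun c => PySem.Chars.isdigit c) : Nat) * 5)
      = ((rnExpand cs).length : Int) := by
    rw [rnExpand_length cs]; push_cast; ring
  have hloop : rnLoop cs (List.replicate (rnExpand cs).length "" ++ rnExpand (cs.drop cs.length))
      ((cs.length : Int) - 1) ((rnExpand cs).length - 1) = rnExpand cs := by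
    have := rnLoop_invariant cs cs.length le_rfl
    simpa using this
  simp only [hfold, hlen]
  rw [show (((rnExpand cs).length : Int)).toNat = (rnExpand cs).length from by omega]
  rw [show (List.replicate (rnExpand cs).length ("":String)) = List.replicate (rnExpand cs).length "" ++ rnExpand (cs.drop cs.length) from by simp [rnExpand]]
  rw [hloop]
  apply String.toList_inj.mp
  rw [join_toList, join_toList, join_nil_flatten, join_nil_flatten]
  exact rnExpand_join cs
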